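-- pv_equiv track=rewrite | github.com/hehuihui1994/emotion_classification_based_on_ensemble_of_multiple_classifiers | ensemble_of_multiple_classifiers/ngram.py | get_doc_triple_list
-- ===== SOURCE A (Python) =====
-- def get_doc_unis_list(doc_str_list):
--     '''generate unigram language model for each segmented instance'''
--     unis_list = [x.strip().split() for x in doc_str_list]
--     return unis_list
--
-- def get_doc_bis_list(doc_str_list):
--     '''generate bigram language model for each segmented instance'''
--     unis_list = get_doc_unis_list(doc_str_list)
--     doc_bis_list = []
--     for k in range(len(doc_str_list)):
--         unis = unis_list[k]
--         if len(unis) == 0: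
--             doc_bis_list.append([])
--             continue
--         unis_pre, unis_after = ['<bos>'] + unis, unis + ['<eos>']
--         doc_bis_list.append([x + '<w-w>' + y for x, y in zip(unis_pre, unis_after)])
--     return doc_bis_list
--
-- def get_doc_triple_list(doc_str_list):
--     '''generate triple-gram language model for each segmented instance'''
--     doc_unis_list = get_doc_unis_list(doc_str_list)
--     doc_bis_list = get_doc_bis_list(doc_str_list)
--     doc_triple_list = []
--     for k in range(len(doc_str_list)):
--         unis = doc_unis_list[k]
--         bis = doc_bis_list[k]
--         if len(bis)<=2:
--             doc_triple_list.append([])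
--             continue
--         pre, after = bis[:-1], unis[1:] + ['<eos>']
--         doc_triple_list.append([x + '<w-w>' + y for x, y in zip(pre, after)])
--     return doc_triple_list
-- ===== SOURCE B (Python) =====
-- def get_doc_triple_list(doc_str_list):
--     '''generate triple-gram language model for each segmented instance'''
--     doc_triple_list = []
--     for doc in doc_str_list:
--         toks = doc.strip().split()
--         if len(toks) < 2:
--             doc_triple_list.append([])
--             continue
--         p = ['<bos>'] + toks + ['<eos>']
--         doc_triple_list.append([a + '<w-w>' + b + '<w-w>' + c
--                                 for a, b, c in zip(p, p[1:], p[2:])])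
--     return doc_triple_list
-- ===== Notes on version B (the rewrite author's own statement) =====
-- stated objective: simpler
-- what changed: B builds each document's trigrams in one pass over the <bos>/<eos>-padded token list via a three-way offset zip, instead of A's two-stage pipeline that first materialises every bigram string for all documents and then zips them with a third token.
import Mathlib
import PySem

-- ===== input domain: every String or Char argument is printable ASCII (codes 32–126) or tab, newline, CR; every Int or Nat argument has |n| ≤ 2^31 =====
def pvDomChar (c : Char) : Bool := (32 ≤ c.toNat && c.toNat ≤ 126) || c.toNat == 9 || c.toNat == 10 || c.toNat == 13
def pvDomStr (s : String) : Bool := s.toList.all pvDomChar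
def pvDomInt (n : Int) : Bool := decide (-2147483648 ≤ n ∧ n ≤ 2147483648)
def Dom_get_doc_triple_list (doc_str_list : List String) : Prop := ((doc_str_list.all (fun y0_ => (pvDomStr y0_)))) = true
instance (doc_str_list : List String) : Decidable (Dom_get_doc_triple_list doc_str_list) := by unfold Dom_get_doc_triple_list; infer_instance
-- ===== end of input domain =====

-- B builds each document's trigrams in ONE pass over the <bos>/<eos>-padded token list with a
-- three-way offset zip, instead of A's two stages (build all bigram strings, then zip them with a
-- third token); objective: simpler.

-- ===== PORT A =====
-- x.strip().split()
def get_doc_unis_list (doc_str_list : List String) : List (List String) :=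
  doc_str_list.map (fun x => PySem.Str.split₀ (PySem.Str.strip x))

def get_doc_bis_list (doc_str_list : List String) : List (List String) :=
  let unis_list := get_doc_unis_list doc_str_list
  -- the Python loop indexes unis_list[k] for k in range(len): a map over unis_list
  unis_list.map (fun unis =>
    if unis.length = 0 then []
    else (List.zip ("<bos>" :: unis) (unis ++ ["<eos>"])).map
           (fun xy => (xy.1 ++ "<w-w>") ++ xy.2))

def get_doc_triple_list (doc_str_list : List String) : List (List String) :=
  let doc_unis_list := get_doc_unis_list doc_str_list
  let doc_bis_list := get_doc_bis_list doc_str_list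
  -- loop over k in range(len) indexing both equal-length lists: zipWith
  List.zipWith (fun unis bis =>
    if bis.length ≤ 2 then []
    else (List.zip bis.dropLast (unis.drop 1 ++ ["<eos>"])).map
           (fun xy => (xy.1 ++ "<w-w>") ++ xy.2))
    doc_unis_list doc_bis_list

-- ===== PORT B =====
def get_doc_triple_list_alt (doc_str_list : List String) : List (List String) :=
  doc_str_list.map (fun doc =>
    let toks := PySem.Str.split₀ (PySem.Str.strip doc)
    if toks.length < 2 then []
    else
      let p := "<bos>" :: (toks ++ ["<eos>"])
      List.zipWith3 (fun a b c => (((a ++ "<w-w>") ++ b) ++ "<w-w>") ++ c)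
        p (p.drop 1) (p.drop 2))

-- ===== PRECONDITION & SPEC =====
def Spec_get_doc_triple_list (doc_str_list : List String) (out : List (List String)) : Prop := out = get_doc_triple_list_alt doc_str_list
instance (doc_str_list : List String) (out : List (List String)) : Decidable (Spec_get_doc_triple_list doc_str_list out) := by unfold Spec_get_doc_triple_list; infer_instance

-- ===== CLAIM (what is proved, stated in full; the proofs are below) =====
def Claim_equal_get_doc_triple_list : Prop := ∀ (doc_str_list : List String), Dom_get_doc_triple_list doc_str_list → Spec_get_doc_triple_list doc_str_list (get_doc_triple_list doc_str_list)

-- ===== LEMMAS AND PROOFS =====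

-- Core per-document fact: A's zip of (all-but-last bigram strings) with the shifted-by-two token
-- stream equals B's direct three-way zip over the padded list, for ≥ 2 tokens (a b :: us).
theorem tri_key (us : List String) (a b : String) :
    (List.zip
        ((List.zip (a :: b :: us) (b :: (us ++ ["<eos>"]))).map
          (fun xy => (xy.1 ++ "<w-w>") ++ xy.2)).dropLast
        (us ++ ["<eos>"])).map (fun xy => (xy.1 ++ "<w-w>") ++ xy.2)
      = List.zipWith3 (fun a b c => (((a ++ "<w-w>") ++ b) ++ "<w-w>") ++ c)
          (a :: b :: (us ++ ["<eos>"])) (b :: (us ++ ["<eos>"])) (us ++ ["<eos>"]) := by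
  induction us generalizing a b with
  | nil => simp [List.zipWith3]
  | cons c l ih => simpa [List.zipWith3] using ih b c

-- Per-document equality.
theorem tri_doc (unis : List String) :
    (if ((if unis.length = 0 then ([] : List String)
          else (List.zip ("<bos>" :: unis) (unis ++ ["<eos>"])).map
                 (fun xy => (xy.1 ++ "<w-w>") ++ xy.2))).length ≤ 2 then []
     else (List.zip ((if unis.length = 0 then ([] : List String)
          else (List.zip ("<bos>" :: unis) (unis ++ ["<eos>"])).map
                 (fun xy => (xy.1 ++ "<w-w>") ++ xy.2))).dropLast
            (unis.drop 1 ++ ["<eos>"])).map (fun xy => (xy.1 ++ "<w-w>") ++ xy.2))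
    = (if unis.length < 2 then []
       else
         let p := "<bos>" :: (unis ++ ["<eos>"])
         List.zipWith3 (fun a b c => (((a ++ "<w-w>") ++ b) ++ "<w-w>") ++ c)
           p (p.drop 1) (p.drop 2)) := by
  match unis with
  | [] => simp
  | [u] => simp
  | u0 :: u1 :: us =>
      have h := tri_key (u1 :: us) "<bos>" u0
      simpa using h

-- ===== VERDICT (by name: the statement is the Claim_ definition above) =====
theorem get_doc_triple_list_spec : Claim_equal_get_doc_triple_list := by
  intro l hd
  clear hd
  unfold Spec_get_doc_triple_list
  induction l with
  | nil => rfl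
  | cons x xs ih =>
      simp only [get_doc_triple_list, get_doc_unis_list, get_doc_bis_list,
        get_doc_triple_list_alt, List.map_cons, List.zipWith_cons_cons] at *
      exact congrArg₂ List.cons (tri_doc _) ih
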